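-- pv_equiv track=rewrite | github.com/theepakkumar187-rgb/torroreactpooja | backend/api/starburst.py | get_pii_sensitivity_level
-- ===== SOURCE A (Python) =====
-- from typing import List, Optional, Dict, Any
--
-- def get_pii_sensitivity_level(column_tags: List[str], column_name: str) -> str:
--     """
--     Determine PII sensitivity level based on tags and column name
--     Returns: 'CRITICAL', 'HIGH', 'MEDIUM', 'LOW', or 'NONE'
--     """
--     col_name = column_name.lower()
--     tags_str = ' '.join(column_tags).upper()
--
--     # CRITICAL PII - Full masking required
--     critical_tags = ['SSN', 'CRITICAL_PII', 'CREDENTIALS', 'PASSWORD', 'SECRET', 'TOKEN']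
--     critical_patterns = ['ssn', 'social_security', 'credit_card', 'bank_account', 'passport', 'license']
--
--     if any(tag in tags_str for tag in critical_tags) or any(pattern in col_name for pattern in critical_patterns):
--         return 'CRITICAL'
--
--     # HIGH PII - Strong masking
--     high_tags = ['FINANCIAL', 'PAYMENT_INFO', 'CRITICAL_PII']
--     high_patterns = ['email', 'phone', 'address', 'zipcode', 'postal']
--
--     if any(tag in tags_str for tag in high_tags) or any(pattern in col_name for pattern in high_patterns):
--         return 'HIGH'
--
--     # MEDIUM PII - Partial masking
--     medium_tags = ['PII', 'SENSITIVE', 'PERSONAL_INFO']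
--     medium_patterns = ['name', 'first_name', 'last_name', 'birth', 'dob']
--
--     if any(tag in tags_str for tag in medium_tags) or any(pattern in col_name for pattern in medium_patterns):
--         return 'MEDIUM'
--
--     # LOW PII - Light masking
--     low_tags = ['DATA_PRIVACY']
--     low_patterns = ['user_id', 'customer_id', 'ip_address']
--
--     if any(tag in tags_str for tag in low_tags) or any(pattern in col_name for pattern in low_patterns):
--         return 'LOW'
--
--     return 'NONE'
-- ===== SOURCE B (Python) =====
-- LEVELS = ['NONE', 'LOW', 'MEDIUM', 'HIGH', 'CRITICAL']
--
-- TAG_SCORES = {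
--     'SSN': 4, 'CRITICAL_PII': 4, 'CREDENTIALS': 4, 'PASSWORD': 4, 'SECRET': 4, 'TOKEN': 4,
--     'FINANCIAL': 3, 'PAYMENT_INFO': 3,
--     'PII': 2, 'SENSITIVE': 2, 'PERSONAL_INFO': 2,
--     'DATA_PRIVACY': 1,
-- }
--
-- NAME_SCORES = {
--     'ssn': 4, 'social_security': 4, 'credit_card': 4, 'bank_account': 4, 'passport': 4, 'license': 4,
--     'email': 3, 'phone': 3, 'address': 3, 'zipcode': 3, 'postal': 3,
--     'name': 2, 'first_name': 2, 'last_name': 2, 'birth': 2, 'dob': 2,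
--     'user_id': 1, 'customer_id': 1, 'ip_address': 1,
-- }
--
--
-- def get_pii_sensitivity_level(column_tags, column_name):
--     """Score every matching keyword and return the level of the maximum score."""
--     tags_str = ' '.join(column_tags).upper()
--     col_name = column_name.lower()
--     best = 0
--     for kw, sc in TAG_SCORES.items():
--         if kw in tags_str and sc > best:
--             best = sc
--     for kw, sc in NAME_SCORES.items():
--         if kw in col_name and sc > best:
--             best = sc
--     return LEVELS[best]
-- ===== Notes on version B (the rewrite author's own statement) =====
-- stated objective: alternative
-- what changed: Replaced A's prioritized early-return tier chain by an order-independent max-score aggregation: a flat keyword->score dict is scanned once keeping the best score, and the level is read from a table indexed by that score.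
import Mathlib
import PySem

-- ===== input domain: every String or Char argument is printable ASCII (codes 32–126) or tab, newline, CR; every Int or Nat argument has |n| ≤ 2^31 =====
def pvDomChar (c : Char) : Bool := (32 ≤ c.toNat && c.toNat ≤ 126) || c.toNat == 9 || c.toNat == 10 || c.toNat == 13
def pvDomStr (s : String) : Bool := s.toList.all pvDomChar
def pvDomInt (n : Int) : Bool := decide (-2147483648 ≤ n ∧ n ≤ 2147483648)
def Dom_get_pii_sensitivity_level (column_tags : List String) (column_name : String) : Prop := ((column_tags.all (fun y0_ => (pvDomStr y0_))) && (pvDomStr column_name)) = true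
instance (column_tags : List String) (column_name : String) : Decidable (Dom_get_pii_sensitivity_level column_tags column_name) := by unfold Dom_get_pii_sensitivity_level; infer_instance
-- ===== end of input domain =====

-- B replaces A's prioritized short-circuit tier checks by a max-score aggregation over a flat keyword→score map (alternative).


-- ===== PORT A =====
def get_pii_sensitivity_level (column_tags : List String) (column_name : String) : String :=
  let col_name := PySem.Str.lower column_name
  let tags_str := PySem.Str.upper (PySem.Str.join " " column_tags)
  let critical_tags := ["SSN", "CRITICAL_PII", "CREDENTIALS", "PASSWORD", "SECRET", "TOKEN"]
  let critical_patterns := ["ssn", "social_security", "credit_card", "bank_account", "passport", "license"]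
  if critical_tags.any (fun tag => PySem.Str.isIn tag tags_str) || critical_patterns.any (fun pattern => PySem.Str.isIn pattern col_name) then "CRITICAL"
  else
  let high_tags := ["FINANCIAL", "PAYMENT_INFO", "CRITICAL_PII"]
  let high_patterns := ["email", "phone", "address", "zipcode", "postal"]
  if high_tags.any (fun tag => PySem.Str.isIn tag tags_str) || high_patterns.any (fun pattern => PySem.Str.isIn pattern col_name) then "HIGH"
  else
  let medium_tags := ["PII", "SENSITIVE", "PERSONAL_INFO"]
  let medium_patterns := ["name", "first_name", "last_name", "birth", "dob"]
  if medium_tags.any (fun tag => PySem.Str.isIn tag tags_str) || medium_patterns.any (fun pattern => PySem.Str.isIn pattern col_name) then "MEDIUM"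
  else
  let low_tags := ["DATA_PRIVACY"]
  let low_patterns := ["user_id", "customer_id", "ip_address"]
  if low_tags.any (fun tag => PySem.Str.isIn tag tags_str) || low_patterns.any (fun pattern => PySem.Str.isIn pattern col_name) then "LOW"
  else "NONE"

-- ===== PORT B =====
-- B: flat keyword→score dicts (insertion order), a '>'-guarded max scan over each, and a level table indexed by the best score.
def pvLevels : List String := ["NONE", "LOW", "MEDIUM", "HIGH", "CRITICAL"]

def pvTagScores : List (String × Nat) :=
  [("SSN", 4), ("CRITICAL_PII", 4), ("CREDENTIALS", 4), ("PASSWORD", 4), ("SECRET", 4), ("TOKEN", 4),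
   ("FINANCIAL", 3), ("PAYMENT_INFO", 3),
   ("PII", 2), ("SENSITIVE", 2), ("PERSONAL_INFO", 2),
   ("DATA_PRIVACY", 1)]

def pvNameScores : List (String × Nat) :=
  [("ssn", 4), ("social_security", 4), ("credit_card", 4), ("bank_account", 4), ("passport", 4), ("license", 4),
   ("email", 3), ("phone", 3), ("address", 3), ("zipcode", 3), ("postal", 3),
   ("name", 2), ("first_name", 2), ("last_name", 2), ("birth", 2), ("dob", 2),
   ("user_id", 1), ("customer_id", 1), ("ip_address", 1)]

-- the Python loop 'for kw, sc in D.items(): if kw in s and sc > best: best = sc'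
def pvBestScore (s : String) (scores : List (String × Nat)) (best : Nat) : Nat :=
  scores.foldl (fun b p => if PySem.Str.isIn p.1 s && decide (b < p.2) then p.2 else b) best

def get_pii_sensitivity_level_alt (column_tags : List String) (column_name : String) : String :=
  let tags_str := PySem.Str.upper (PySem.Str.join " " column_tags)
  let col_name := PySem.Str.lower column_name
  let best := pvBestScore col_name pvNameScores (pvBestScore tags_str pvTagScores 0)
  -- LEVELS[best]: pyGet? is exact for Python's indexing; here 0 ≤ best ≤ 4 < 5 = len(LEVELS), so it is always `some`
  (PySem.List.pyGet? pvLevels (best : Int)).getD ""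

-- ===== PRECONDITION & SPEC =====
def Spec_get_pii_sensitivity_level (column_tags : List String) (column_name : String) (out : String) : Prop := out = get_pii_sensitivity_level_alt column_tags column_name
instance (column_tags : List String) (column_name : String) (out : String) : Decidable (Spec_get_pii_sensitivity_level column_tags column_name out) := by unfold Spec_get_pii_sensitivity_level; infer_instance

-- ===== CLAIM (what is proved, stated in full; the proofs are below) =====
def Claim_equal_get_pii_sensitivity_level : Prop := ∀ (column_tags : List String) (column_name : String), Dom_get_pii_sensitivity_level column_tags column_name → Spec_get_pii_sensitivity_level column_tags column_name (get_pii_sensitivity_level column_tags column_name)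

-- ===== LEMMAS AND PROOFS =====

-- the '>'-guarded update loop is the running maximum over matching keywords
theorem pvBestScore_eq_max (s : String) (l : List (String × Nat)) (best : Nat) :
    pvBestScore s l best
      = l.foldl (fun b p => if PySem.Str.isIn p.1 s then Nat.max b p.2 else b) best := by
  induction l generalizing best with
  | nil => rfl
  | cons hd tl ih =>
      simp only [pvBestScore, List.foldl_cons] at ih ⊢
      rw [ih]
      congr 1
      cases PySem.Str.isIn hd.1 s with
      | false => simp
      | true => simp only [Bool.true_and, decide_eq_true_eq, if_true, Nat.max_def]; split_ifs <;> omega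

-- folding one constant-score group of keywords
theorem pvGroup (s : String) (kws : List String) (sc best : Nat) :
    (kws.map (fun w => (w, sc))).foldl (fun b p => if PySem.Str.isIn p.1 s then Nat.max b p.2 else b) best
      = if kws.any (fun w => PySem.Str.isIn w s) then Nat.max best sc else best := by
  induction kws generalizing best with
  | nil => simp
  | cons hd tl ih =>
      simp only [List.map_cons, List.foldl_cons, List.any_cons]
      by_cases h : PySem.Str.isIn hd s = true
      · simp only [h, Bool.true_or, reduceIte, ih]
        split_ifs
        · show max (max best sc) sc = max best sc
          rw [max_assoc, max_self]
        · rfl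
      · have h' : PySem.Str.isIn hd s = false := by simpa using h
        simp only [h', Bool.false_or, Bool.false_eq_true, reduceIte]
        exact ih best

-- B's flat dicts split into their constant-score groups
theorem pvTagScores_grouped : pvTagScores =
    (["SSN", "CRITICAL_PII", "CREDENTIALS", "PASSWORD", "SECRET", "TOKEN"].map (fun w => (w, 4)))
    ++ (["FINANCIAL", "PAYMENT_INFO"].map (fun w => (w, 3)))
    ++ (["PII", "SENSITIVE", "PERSONAL_INFO"].map (fun w => (w, 2)))
    ++ (["DATA_PRIVACY"].map (fun w => (w, 1))) := rfl

theorem pvNameScores_grouped : pvNameScores =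
    (["ssn", "social_security", "credit_card", "bank_account", "passport", "license"].map (fun w => (w, 4)))
    ++ (["email", "phone", "address", "zipcode", "postal"].map (fun w => (w, 3)))
    ++ (["name", "first_name", "last_name", "birth", "dob"].map (fun w => (w, 2)))
    ++ (["user_id", "customer_id", "ip_address"].map (fun w => (w, 1))) := rfl

-- closed form of B's two grouped max-folds over eight match flags
def pvCombine (t4 t3 t2 t1 n4 n3 n2 n1 : Bool) : Nat :=
  let b1 := if t4 then Nat.max 0 4 else 0
  let b2 := if t3 then Nat.max b1 3 else b1
  let b3 := if t2 then Nat.max b2 2 else b2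
  let b4 := if t1 then Nat.max b3 1 else b3
  let c1 := if n4 then Nat.max b4 4 else b4
  let c2 := if n3 then Nat.max c1 3 else c1
  let c3 := if n2 then Nat.max c2 2 else c2
  if n1 then Nat.max c3 1 else c3

-- the Boolean core: A's priority chain equals the level of the maximum score,
-- given that the shared keyword CRITICAL_PII (cp) implies the critical tag match (Ct)
theorem pvMain : ∀ (Ct Cn Ht Hn Mt Mn Lt Ln cp : Bool), (cp = true → Ct = true) →
    (if (Ct || Cn) = true then "CRITICAL"
     else if ((Ht || cp) || Hn) = true then "HIGH"
     else if (Mt || Mn) = true then "MEDIUM"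
     else if (Lt || Ln) = true then "LOW"
     else "NONE")
    = (PySem.List.pyGet? pvLevels ((pvCombine Ct Ht Mt Lt Cn Hn Mn Ln) : Int)).getD "" := by
  decide

-- ===== VERDICT (by name: the statement is the Claim_ definition above) =====
theorem get_pii_sensitivity_level_spec : Claim_equal_get_pii_sensitivity_level := by
  intro column_tags column_name _
  unfold Spec_get_pii_sensitivity_level get_pii_sensitivity_level get_pii_sensitivity_level_alt
  dsimp only
  rw [pvBestScore_eq_max, pvBestScore_eq_max, pvTagScores_grouped, pvNameScores_grouped]
  simp only [List.foldl_append, pvGroup]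
  set t := PySem.Str.upper (PySem.Str.join " " column_tags) with ht
  set n := PySem.Str.lower column_name with hn
  have hHigh : (["FINANCIAL", "PAYMENT_INFO", "CRITICAL_PII"].any fun tag => PySem.Str.isIn tag t)
      = ((["FINANCIAL", "PAYMENT_INFO"].any fun w => PySem.Str.isIn w t) || PySem.Str.isIn "CRITICAL_PII" t) := by
    simp [List.any_cons, Bool.or_assoc]
  have h1 : PySem.Str.isIn "CRITICAL_PII" t = true →
      (["SSN", "CRITICAL_PII", "CREDENTIALS", "PASSWORD", "SECRET", "TOKEN"].any fun w => PySem.Str.isIn w t) = true := by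
    intro h
    simp only [List.any_cons, List.any_nil, Bool.or_false, Bool.or_eq_true]
    exact Or.inr (Or.inl h)
  simp only [hHigh]
  exact pvMain _ _ _ _ _ _ _ _ _ h1
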